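-- pv_equiv track=rewrite | github.com/kseungwoo/algorithm-problem-solving | Programmers/2021 KAKAO BLIND RECRUITMENT/신규 아이디 추천.py | solution
-- ===== SOURCE A (Python) =====
-- def solution(new_id):
--     # Step 1
--     id1 = new_id.lower()
--     # Step 2
--     id2 = ""
--     for c in id1:
--         if c.isalpha() or c.isdigit() or c in ['-', '_', '.']:
--             id2 = id2 + c
--     # Step 3
--     dotBefore = False
--     id3 = ""
--     for c in id2:
--         if c != '.':
--             dotBefore = False
--             id3 = id3 + c
--         elif c == '.':
--             if not dotBefore:
--                 dotBefore = True
--                 id3 = id3 + c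
--     # Step 4
--     id4 = id3
--     if id4 == "." or id4 == "..":
--         id4 = ""
--     else:
--         if id4[0] == '.':
--             id4 = id4[1:]
--         if id4[-1] == '.':
--             id4 = id4[:-1]
--     # Step 5
--     id5 = id4
--     if id5 == "":
--         id5 += "a"
--     # Step 6
--     id6 = id5
--     if len(id6) >= 16:
--         id6 = id6[:15]
--         if id6[-1] == '.':
--             id6 = id6[:-1]
--     # Step 7
--     id7 = id6
--     if len(id7) <= 2:
--         while len(id7) != 3:
--             id7 = id7 + id7[-1]
--
--     answer = id7
--     return answer
-- ===== SOURCE B (Python) =====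
-- def solution(new_id):
--     # One-pass state machine: a dot is only emitted lazily (pending flag) when a
--     # word character follows and output is nonempty, so duplicate, leading and
--     # trailing dots never appear at all; then default/cap/pad.
--     out = []
--     pending = False
--     for c in new_id.lower():
--         if c == '.':
--             if out:
--                 pending = True
--         elif c.isalpha() or c.isdigit() or c in '-_':
--             if pending:
--                 out.append('.')
--                 pending = False
--             out.append(c)
--     if not out:
--         out = ['a']
--     if len(out) > 15:
--         out = out[:15]
--         if out[-1] == '.':
--             out.pop()
--     while len(out) < 3:
--         out.append(out[-1])
--     return ''.join(out)
-- ===== Notes on version B (the rewrite author's own statement) =====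
-- stated objective: faster
-- what changed: Replaces A's four staged passes (filter loop, dot-collapse loop with a flag, '.'/'..' special cases and index-based boundary stripping) by a single state-machine pass that emits a dot lazily only when a word character follows and output is nonempty, so duplicate, leading and trailing dots are never produced and steps 2-4 collapse into one loop over a list instead of repeated string concatenation.
import Mathlib
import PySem

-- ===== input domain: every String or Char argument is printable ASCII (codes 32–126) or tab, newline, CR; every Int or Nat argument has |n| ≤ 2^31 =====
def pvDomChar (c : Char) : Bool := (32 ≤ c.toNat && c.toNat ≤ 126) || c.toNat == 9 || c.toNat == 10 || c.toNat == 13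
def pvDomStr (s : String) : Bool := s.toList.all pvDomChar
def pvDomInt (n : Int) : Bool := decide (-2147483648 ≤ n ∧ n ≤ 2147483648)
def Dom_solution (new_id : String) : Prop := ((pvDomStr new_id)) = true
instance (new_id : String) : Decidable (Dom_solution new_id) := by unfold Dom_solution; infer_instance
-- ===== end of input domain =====

-- ===== PORT A =====
-- B replaces A's four staged loops (filter, dot-collapse with a flag, boundary
-- stripping with special cases) by ONE pass that emits a dot lazily, so duplicate,
-- leading and trailing dots never appear; return-value equivalence only.
-- step 7's while loop, as a recursion on 3 - len
def padTo3 (l : List Char) : List Char :=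
  if l.length < 3 then
    match PySem.List.pyGet? l (-1) with      -- id7[-1] (none = IndexError, only on [], unreachable after step 5)
    | some c => padTo3 (l ++ [c])
    | none => l
  else l
termination_by 3 - l.length
decreasing_by simp; omega

def solution (new_id : String) : String :=
  -- Step 1
  let id1 := PySem.Chars.lower new_id.toList
  -- Step 2
  let id2 := id1.foldl (fun acc c =>
    if PySem.Chars.isalpha c || PySem.Chars.isdigit c || decide (c ∈ ['-', '_', '.']) then acc ++ [c]
    else acc) []
  -- Step 3 (state = (dotBefore, id3))
  let st := id2.foldl (fun (s : Bool × List Char) c =>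
    if c ≠ '.' then (false, s.2 ++ [c])
    else if s.1 = false then (true, s.2 ++ [c])
    else s) (false, ([] : List Char))
  let id3 := st.2
  -- Step 4 (id4[0] / id4[-1] raise on empty id3; excluded by Pre_)
  let id4 :=
    if id3 = ['.'] ∨ id3 = ['.', '.'] then ([] : List Char)
    else
      let id4a := if PySem.List.pyGet? id3 0 = some '.' then PySem.List.slice id3 (some 1) none else id3
      if PySem.List.pyGet? id4a (-1) = some '.' then PySem.List.slice id4a none (some (-1)) else id4a
  -- Step 5
  let id5 := if id4 = [] then id4 ++ ['a'] else id4
  -- Step 6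
  let id6 :=
    if 16 ≤ id5.length then
      let id6a := PySem.List.slice id5 none (some 15)
      if PySem.List.pyGet? id6a (-1) = some '.' then PySem.List.slice id6a none (some (-1)) else id6a
    else id5
  -- Step 7
  let id7 := if id6.length ≤ 2 then padTo3 id6 else id6
  String.ofList id7

-- ===== PORT B =====
-- loop body of B's single pass: state = (out, pending)
def stepB (s : List Char × Bool) (c : Char) : List Char × Bool :=
  if c = '.' then (if s.1 ≠ [] then (s.1, true) else s)
  else if PySem.Chars.isalpha c || PySem.Chars.isdigit c || decide (c ∈ ['-', '_']) then
    ((if s.2 then s.1 ++ ['.'] else s.1) ++ [c], false)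
  else s

-- B's trailing while loop: while len(out) < 3: out.append(out[-1])
def padB (l : List Char) : List Char :=
  if l.length < 3 then
    match PySem.List.pyGet? l (-1) with
    | some c => padB (l ++ [c])
    | none => l
  else l
termination_by 3 - l.length
decreasing_by simp; omega

def solution_alt (new_id : String) : String :=
  let st := (PySem.Chars.lower new_id.toList).foldl stepB ([], false)
  let out0 := st.1
  let out1 := if out0 = [] then ['a'] else out0
  let out2 :=
    if 15 < out1.length then
      let t := PySem.List.slice out1 none (some 15)
      if PySem.List.pyGet? t (-1) = some '.' then t.dropLast else t
    else out1
  String.ofList (padB out2)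

-- ===== PRECONDITION & SPEC =====
-- Pre_ excludes inputs with no letter/digit/-_. character at all: there A's step 4
-- indexes the empty string and raises IndexError (B returns "aaa" there).
def Pre_solution (new_id : String) : Prop :=
  (PySem.Chars.lower new_id.toList).any (fun c =>
    PySem.Chars.isalpha c || PySem.Chars.isdigit c || decide (c ∈ ['-', '_', '.'])) = true
instance (new_id : String) : Decidable (Pre_solution new_id) := by unfold Pre_solution; infer_instance

def pvWitness_solution : String := "...!!bad=input.Ab"

def Spec_solution (new_id : String) (out : String) : Prop := out = solution_alt new_id
instance (new_id : String) (out : String) : Decidable (Spec_solution new_id out) := by unfold Spec_solution; infer_instance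

-- ===== CLAIM (what is proved, stated in full; the proofs are below) =====
def Claim_equal_solution : Prop := ∀ (new_id : String), Dom_solution new_id → Pre_solution new_id → Spec_solution new_id (solution new_id)

-- ===== LEMMAS AND PROOFS =====

def collapse : Bool → List Char → List Char
  | _, [] => []
  | b, c :: cs =>
    if c = '.' then (if b then collapse true cs else '.' :: collapse true cs)
    else c :: collapse false cs

def nodd (l : List Char) : Prop := List.IsChain (fun a b => a ≠ '.' ∨ b ≠ '.') l

theorem step3_foldl (l : List Char) (b : Bool) (acc : List Char) :
    (l.foldl (fun (s : Bool × List Char) c =>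
      if c ≠ '.' then (false, s.2 ++ [c])
      else if s.1 = false then (true, s.2 ++ [c])
      else s) (b, acc)).2 = acc ++ collapse b l := by
  induction l generalizing b acc with
  | nil => simp [collapse]
  | cons c cs ih =>
    by_cases hc : c = '.'
    · subst hc
      rw [List.foldl_cons]
      cases b
      · show (List.foldl _ (true, acc ++ ['.']) cs).2 = _
        rw [ih]; simp [collapse]
      · show (List.foldl _ (true, acc) cs).2 = _
        rw [ih]; simp [collapse]
    · have : (c :: cs).foldl (fun (s : Bool × List Char) c =>
          if c ≠ '.' then (false, s.2 ++ [c])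
          else if s.1 = false then (true, s.2 ++ [c])
          else s) (b, acc)
        = cs.foldl (fun (s : Bool × List Char) c =>
          if c ≠ '.' then (false, s.2 ++ [c])
          else if s.1 = false then (true, s.2 ++ [c])
          else s) (false, acc ++ [c]) := by
        rw [List.foldl_cons]; congr 1; simp [hc]
      rw [this, ih]; simp [collapse, hc]

theorem collapse_true_head (cs : List Char) :
    ∀ y ∈ (collapse true cs).head?, y ≠ '.' := by
  induction cs with
  | nil => simp [collapse]
  | cons c cs' ih =>
    by_cases hc : c = '.'
    · simpa [collapse, hc] using ih
    · simp [collapse, hc]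

theorem collapse_chain (b : Bool) (l : List Char) : nodd (collapse b l) := by
  induction l generalizing b with
  | nil => simp [collapse, nodd]
  | cons c cs ih =>
    by_cases hc : c = '.'
    · subst hc
      cases b with
      | true => simpa [collapse] using ih true
      | false =>
        rw [show collapse false ('.' :: cs) = '.' :: collapse true cs from by simp [collapse]]
        rw [nodd, List.isChain_cons]
        exact ⟨fun y hy => Or.inr (collapse_true_head cs y hy), ih true⟩
    · rw [show collapse b (c :: cs) = c :: collapse false cs from by simp [collapse, hc]]
      rw [nodd, List.isChain_cons]
      exact ⟨fun y _ => Or.inl hc, ih false⟩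

theorem pyGet?_zero_head (l : List Char) : PySem.List.pyGet? l 0 = l.head? := by
  rw [show (0:Int) = ((0:Nat):Int) from rfl, PySem.List.pyGet?_natCast]
  cases l <;> rfl

theorem nodd_reverse {l : List Char} (h : nodd l) : nodd l.reverse := by
  rw [nodd, List.isChain_reverse]
  exact h.imp (fun _ _ hab => hab.symm)

theorem nodd_suffix {l m : List Char} (h : nodd l) (hs : m <:+ l) : nodd m :=
  List.IsChain.suffix h hs

theorem lstrip_nodd {p : Char → Bool} (hp : ∀ c, p c = (c == '.'))
    (l : List Char) (h : nodd l) :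
    List.dropWhile p l = if l.head? = some '.' then l.tail else l := by
  cases l with
  | nil => simp
  | cons c cs =>
    by_cases hc : c = '.'
    · subst hc
      rw [List.dropWhile_cons, if_pos (by simp [hp]), if_pos (by simp)]
      cases cs with
      | nil => simp
      | cons d ds =>
        have hd : d ≠ '.' := by
          rcases (List.isChain_cons.mp h).1 d rfl with h1 | h1
          · exact absurd rfl h1
          · exact h1
        rw [List.dropWhile_cons, if_neg (by simp [hp, hd])]
        rfl
    · rw [List.dropWhile_cons, if_neg (by simp [hp, hc]), if_neg (by simp [hc])]

theorem rstrip_nodd {p : Char → Bool} (hp : ∀ c, p c = (c == '.'))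
    (l : List Char) (h : nodd l) :
    (List.dropWhile p l.reverse).reverse
      = if l.getLast? = some '.' then l.dropLast else l := by
  rw [lstrip_nodd hp l.reverse (nodd_reverse h), List.head?_reverse]
  by_cases hl : l.getLast? = some '.'
  · rw [if_pos hl, if_pos hl, List.tail_reverse, List.reverse_reverse]
  · rw [if_neg hl, if_neg hl, List.reverse_reverse]

theorem contains_dot (c : Char) : (['.'] : List Char).contains c = (c == '.') := by
  rw [List.contains_cons]
  simp

theorem stripChars_eq (t : List Char) :
    PySem.Chars.stripChars t ['.']
      = (List.dropWhile (fun c => (['.'] : List Char).contains c)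
          (List.dropWhile (fun c => (['.'] : List Char).contains c) t).reverse).reverse := rfl

theorem step4_eq (l : List Char) (h : nodd l) (hne : l ≠ []) :
    (if l = ['.'] ∨ l = ['.', '.'] then ([] : List Char)
     else
       if PySem.List.pyGet? (if PySem.List.pyGet? l 0 = some '.' then PySem.List.slice l (some 1) none else l) (-1) = some '.'
       then PySem.List.slice (if PySem.List.pyGet? l 0 = some '.' then PySem.List.slice l (some 1) none else l) none (some (-1))
       else (if PySem.List.pyGet? l 0 = some '.' then PySem.List.slice l (some 1) none else l))
    = PySem.Chars.stripChars l ['.'] := by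
  rw [stripChars_eq]
  by_cases h1 : l = ['.'] ∨ l = ['.', '.']
  · rcases h1 with h1 | h1
    · subst h1; decide
    · exfalso
      subst h1
      rcases (List.isChain_cons.mp h).1 '.' rfl with h2 | h2 <;> exact h2 rfl
  · rw [if_neg h1]
    rw [pyGet?_zero_head, PySem.List.slice_from_one]
    have ha : (if l.head? = some '.' then l.tail else l) = List.dropWhile (fun c => (['.'] : List Char).contains c) l :=
      (lstrip_nodd contains_dot l h).symm
    rw [ha, PySem.List.pyGet?_neg_one, PySem.List.slice_to_neg_one,
        rstrip_nodd contains_dot _ (nodd_suffix h (List.dropWhile_suffix _))]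

theorem collapse_ne_nil (l : List Char) (h : l ≠ []) : collapse false l ≠ [] := by
  cases l with
  | nil => exact absurd rfl h
  | cons c cs => by_cases hc : c = '.' <;> simp [collapse, hc]

-- ===== B-side lemmas: the state machine computes strip(collapse(filter …)) =====

def rstr (l : List Char) : List Char := (List.dropWhile (fun c => c == '.') l.reverse).reverse

def emitB : Bool → List Char → List Char
  | _, [] => []
  | p, c :: r => if c = '.' then emitB true r else (if p then ['.'] else []) ++ c :: emitB false r

def leadB : List Char → List Char
  | [] => []
  | c :: r => if c = '.' then leadB r else c :: emitB false r

def keepA (c : Char) : Bool :=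
  PySem.Chars.isalpha c || PySem.Chars.isdigit c || decide (c ∈ ['-', '_', '.'])

theorem stepB_id {c : Char} (h : ¬ keepA c = true) (s : List Char × Bool) : stepB s c = s := by
  have hdot : c ≠ '.' := by rintro rfl; exact h (by decide)
  have hw : ¬ (PySem.Chars.isalpha c || PySem.Chars.isdigit c || decide (c ∈ ['-', '_'])) = true := by
    intro hw
    apply h
    unfold keepA
    simp only [Bool.or_eq_true, decide_eq_true_eq, List.mem_cons, List.not_mem_nil, or_false] at hw ⊢
    tauto
  unfold stepB
  rw [if_neg hdot, if_neg hw]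

theorem foldB_filter (l : List Char) (s : List Char × Bool) :
    l.foldl stepB s = (l.filter keepA).foldl stepB s := by
  induction l generalizing s with
  | nil => rfl
  | cons c r ih =>
    by_cases hc : keepA c = true
    · rw [List.foldl_cons, List.filter_cons_of_pos hc, List.foldl_cons, ih]
    · rw [List.foldl_cons, List.filter_cons_of_neg (by simpa using hc), stepB_id hc, ih]

theorem kept_word {c : Char} (hk : keepA c = true) (hc : c ≠ '.') :
    (PySem.Chars.isalpha c || PySem.Chars.isdigit c || decide (c ∈ ['-', '_'])) = true := by
  unfold keepA at hk
  simp only [Bool.or_eq_true, decide_eq_true_eq, List.mem_cons, List.not_mem_nil] at hk ⊢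
  rcases hk with h | h | h | h | h <;> simp_all

theorem foldB_nonempty (k : List Char) (out : List Char) (p : Bool)
    (hne : out ≠ []) (hk : ∀ c ∈ k, keepA c = true) :
    (k.foldl stepB (out, p)).1 = out ++ emitB p k := by
  induction k generalizing out p with
  | nil => simp [emitB]
  | cons c r ih =>
    by_cases hc : c = '.'
    · subst hc
      rw [List.foldl_cons, show stepB (out, p) '.' = (out, true) from by
            unfold stepB; rw [if_pos rfl, if_pos hne]]
      rw [ih out true hne (fun x hx => hk x (List.mem_cons_of_mem _ hx))]
      simp [emitB]
    · rw [List.foldl_cons, show stepB (out, p) c = ((if p then out ++ ['.'] else out) ++ [c], false) from by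
            unfold stepB; rw [if_neg hc, if_pos (kept_word (hk c List.mem_cons_self) hc)]]
      rw [ih _ false (by split <;> simp) (fun x hx => hk x (List.mem_cons_of_mem _ hx))]
      simp [emitB, hc]
      split <;> simp

theorem foldB_lead (k : List Char) (hk : ∀ c ∈ k, keepA c = true) :
    (k.foldl stepB ([], false)).1 = leadB k := by
  induction k with
  | nil => rfl
  | cons c r ih =>
    by_cases hc : c = '.'
    · subst hc
      rw [List.foldl_cons, show stepB (([] : List Char), false) '.' = ([], false) from by
            unfold stepB; rw [if_pos rfl, if_neg (by simp)]]
      rw [ih (fun x hx => hk x (List.mem_cons_of_mem _ hx))]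
      simp [leadB]
    · rw [List.foldl_cons, show stepB (([] : List Char), false) c = ([c], false) from by
            unfold stepB; rw [if_neg hc, if_pos (kept_word (hk c List.mem_cons_self) hc)]; rfl]
      rw [foldB_nonempty r [c] false (by simp) (fun x hx => hk x (List.mem_cons_of_mem _ hx))]
      simp [leadB, hc]

theorem rstr_middle (pre x : List Char) (c : Char) (hc : c ≠ '.') :
    rstr (pre ++ c :: x) = pre ++ c :: rstr x := by
  unfold rstr
  rw [List.reverse_append, List.reverse_cons, List.append_assoc, List.dropWhile_append]
  by_cases hx : (List.dropWhile (fun c => c == '.') x.reverse) = []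
  · rw [hx]
    simp [hc]
  · rw [if_neg (by simpa using hx)]
    simp

theorem emit_rstr (r : List Char) (p : Bool) :
    emitB p r = rstr ((if p then ['.'] else []) ++ collapse p r) := by
  induction r generalizing p with
  | nil => cases p <;> decide
  | cons c r' ih =>
    by_cases hc : c = '.'
    · subst hc
      have h1 : (if p then ['.'] else []) ++ collapse p ('.' :: r')
          = '.' :: collapse true r' := by
        cases p <;> simp [collapse]
      rw [show emitB p ('.' :: r') = emitB true r' from by simp [emitB], h1, ih true]
      simp
    · rw [show emitB p (c :: r') = (if p then ['.'] else []) ++ c :: emitB false r' from by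
          simp [emitB, hc]]
      rw [show collapse p (c :: r') = c :: collapse false r' from by simp [collapse, hc]]
      rw [rstr_middle _ _ _ hc, ih false]
      simp

theorem drop_collapse (r : List Char) :
    List.dropWhile (fun c => c == '.') (collapse true r)
      = List.dropWhile (fun c => c == '.') (collapse false r) := by
  cases r with
  | nil => rfl
  | cons c t => by_cases hc : c = '.' <;> simp [collapse, hc]

theorem lead_eq (k : List Char) :
    leadB k = rstr (List.dropWhile (fun c => c == '.') (collapse false k)) := by
  induction k with
  | nil => rfl
  | cons c r ih =>
    by_cases hc : c = '.'
    · subst hc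
      rw [show leadB ('.' :: r) = leadB r from by simp [leadB], ih]
      rw [show collapse false ('.' :: r) = '.' :: collapse true r from by simp [collapse]]
      rw [List.dropWhile_cons, if_pos (by simp), drop_collapse]
    · rw [show leadB (c :: r) = c :: emitB false r from by simp [leadB, hc]]
      rw [show collapse false (c :: r) = c :: collapse false r from by simp [collapse, hc]]
      rw [List.dropWhile_cons, if_neg (by simp [hc])]
      have := rstr_middle [] (collapse false r) c hc
      simp only [List.nil_append] at this
      rw [this, emit_rstr]
      simp

theorem stripChars_rstr (l : List Char) :
    PySem.Chars.stripChars l ['.'] = rstr (List.dropWhile (fun c => c == '.') l) := by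
  rw [stripChars_eq]
  have hP : (fun c => (['.'] : List Char).contains c) = (fun c => c == '.') :=
    funext contains_dot
  rw [hP]
  rfl

theorem pad_eq (l : List Char) : padTo3 l = padB l := by
  unfold padTo3 padB
  split
  · split
    · rw [pad_eq]
    · rfl
  · rfl
termination_by 3 - l.length
decreasing_by simp; omega

theorem pad_if (l : List Char) : (if l.length ≤ 2 then padTo3 l else l) = padB l := by
  by_cases h : l.length ≤ 2
  · rw [if_pos h, pad_eq]
  · rw [if_neg h]
    unfold padB
    rw [if_neg (by omega)]

theorem solution_eq_alt (new_id : String) (hpre : Pre_solution new_id) :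
    solution new_id = solution_alt new_id := by
  unfold Pre_solution at hpre
  unfold solution solution_alt
  simp only [PySem.List.foldl_append_if_eq_filter, step3_foldl, List.nil_append]
  rw [foldB_filter]
  set F := (PySem.Chars.lower new_id.toList).filter (fun c =>
    PySem.Chars.isalpha c || PySem.Chars.isdigit c || decide (c ∈ ['-', '_', '.'])) with hF
  have hFK : (PySem.Chars.lower new_id.toList).filter keepA = F := by
    rw [hF]; rfl
  have hFne : F ≠ [] := by
    intro h0
    rw [hF, List.filter_eq_nil_iff] at h0
    rw [List.any_eq_true] at hpre
    obtain ⟨x, hx, hpx⟩ := hpre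
    exact h0 x hx hpx
  have hkeep : ∀ c ∈ F, keepA c = true := by
    intro c hc
    rw [hF] at hc
    exact List.of_mem_filter hc
  rw [hFK, foldB_lead F hkeep, lead_eq]
  set M := collapse false F with hM
  have hMnodd : nodd M := collapse_chain false F
  have hMne : M ≠ [] := collapse_ne_nil F hFne
  rw [step4_eq M hMnodd hMne, stripChars_rstr]
  set S := rstr (List.dropWhile (fun c => c == '.') M) with hS
  have h5 : (if S = [] then S ++ ['a'] else S) = (if S = [] then ['a'] else S) := by
    split <;> simp_all
  rw [h5]
  set u1 := if S = [] then ['a'] else S with hu1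
  have h16 : (16 ≤ u1.length) = (15 < u1.length) := propext (by omega)
  simp only [h16]
  rw [PySem.List.slice_to_neg_one, pad_if]

-- ===== VERDICT (by name: the statement is the Claim_ definition above) =====
theorem solution_spec : Claim_equal_solution := by
  intro new_id _ hpre
  exact solution_eq_alt new_id hpre
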